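-- pv_equiv track=rewrite | github.com/JamieKalloe/ISCRIPT | Week 3/Opdracht13.py | decodeer
-- ===== SOURCE A (Python) =====
-- def decodeer(bericht, kolommen):
--     gedecodeerdBericht = [""] * kolommen
--     omgekeerd = False
--     for rij in range(0, len(bericht), kolommen):
--         kolom = 0
--         for letter in bericht[rij:(rij + kolommen)] if not omgekeerd else bericht[rij:(rij + kolommen)][::-1]:
--             gedecodeerdBericht[kolom] += letter
--             kolom += 1
--         omgekeerd = not omgekeerd
--     return "".join(gedecodeerdBericht)
-- ===== SOURCE B (Python) =====
-- def decodeer(bericht, kolommen):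
--     # Column-major reconstruction: cut the message into rows once, then read
--     # each output column straight out of the rows (even rows left-to-right,
--     # odd rows right-to-left), instead of distributing letters row by row.
--     chunks = [bericht[rij:rij + kolommen] for rij in range(0, len(bericht), kolommen)]
--     kolom_delen = []
--     for c in range(kolommen):
--         tekens = []
--         for i, chunk in enumerate(chunks):
--             L = len(chunk)
--             if c < L:
--                 tekens.append(chunk[c] if i % 2 == 0 else chunk[L - 1 - c])
--         kolom_delen.append("".join(tekens))
--     return "".join(kolom_delen)
-- ===== Notes on version B (the rewrite author's own statement) =====
-- stated objective: alternative
-- what changed: B cuts the message into row chunks once and reads each output column directly out of the chunks (even chunks left-to-right, odd ones right-to-left from their real length), instead of A's row-major distribution of every letter into per-column string accumulators.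
import Mathlib
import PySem

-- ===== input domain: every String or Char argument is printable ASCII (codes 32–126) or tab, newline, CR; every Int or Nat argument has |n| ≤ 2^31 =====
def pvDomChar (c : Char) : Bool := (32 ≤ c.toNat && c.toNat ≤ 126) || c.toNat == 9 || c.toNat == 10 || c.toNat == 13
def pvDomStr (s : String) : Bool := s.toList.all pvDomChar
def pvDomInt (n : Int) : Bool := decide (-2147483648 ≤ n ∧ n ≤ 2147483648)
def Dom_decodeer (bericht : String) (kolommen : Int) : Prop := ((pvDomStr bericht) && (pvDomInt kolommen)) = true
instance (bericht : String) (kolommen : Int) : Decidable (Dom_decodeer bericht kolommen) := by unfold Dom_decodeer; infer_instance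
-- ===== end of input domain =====

-- B re-reads the cipher column by column from the row chunks instead of distributing
-- letters row by row into per-column accumulators (alternative decomposition, same cost).

-- ===== PORT A =====
def decodeer (bericht : String) (kolommen : Int) : String :=
  let bs := bericht.toList
  let res := (PySem.List.pyRange 0 (bs.length : Int) kolommen).foldl
    (fun (st : List (List Char) × Bool) (rij : Int) =>
      let chunk0 := PySem.List.slice bs (some rij) (some (rij + kolommen))
      let chunk := if st.2 then chunk0.reverse else chunk0
      ((chunk.foldl (fun (p : List (List Char) × Nat) (letter : Char) =>
          (p.1.set p.2 (p.1.getD p.2 [] ++ [letter]), p.2 + 1)) (st.1, 0)).1,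
       !st.2))
    (List.replicate kolommen.toNat ([] : List Char), false)
  String.ofList res.1.flatten

-- ===== PORT B =====
def decodeer_alt (bericht : String) (kolommen : Int) : String :=
  let bs := bericht.toList
  let chunks := (PySem.List.pyRange 0 (bs.length : Int) kolommen).map
    (fun rij => PySem.List.slice bs (some rij) (some (rij + kolommen)))
  let kolomDelen := (PySem.List.pyRange 0 kolommen 1).map (fun c =>
    (PySem.List.enumerate chunks 0).foldl
      (fun (tekens : List Char) (p : Int × List Char) =>
        let L : Int := p.2.length
        if c < L then
          tekens ++ [if p.1 % 2 == 0 then p.2.getD c.toNat ' ' else p.2.getD (L - 1 - c).toNat ' ']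
        else tekens) [])
  String.ofList kolomDelen.flatten

-- ===== PRECONDITION & SPEC =====
-- Pre_ excludes only kolommen = 0, where A raises ValueError (range step 0).
def Pre_decodeer (bericht : String) (kolommen : Int) : Prop := kolommen ≠ 0
instance (bericht : String) (kolommen : Int) : Decidable (Pre_decodeer bericht kolommen) := by unfold Pre_decodeer; infer_instance
def pvWitness_decodeer : String × Int := ("GEHEIM BERICHT", 3)

def Spec_decodeer (bericht : String) (kolommen : Int) (out : String) : Prop := out = decodeer_alt bericht kolommen
instance (bericht : String) (kolommen : Int) (out : String) : Decidable (Spec_decodeer bericht kolommen out) := by unfold Spec_decodeer; infer_instance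

-- ===== CLAIM (what is proved, stated in full; the proofs are below) =====
def Claim_equal_decodeer : Prop := ∀ (bericht : String) (kolommen : Int), Dom_decodeer bericht kolommen → Pre_decodeer bericht kolommen → Spec_decodeer bericht kolommen (decodeer bericht kolommen)

-- ===== LEMMAS AND PROOFS =====

def pvDist : List (List Char) → List Char → List (List Char)
  | [], _ => []
  | cols, [] => cols
  | col :: cols, x :: ch => (col ++ [x]) :: pvDist cols ch

def pvColF (c : Nat) : Bool → List (List Char) → List Char
  | _, [] => []
  | om, ch :: cs =>
    (if c < ch.length then
       [if om then ch.getD (ch.length - 1 - c) ' ' else ch.getD c ' ']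
     else []) ++ pvColF c (!om) cs

theorem pvDist_length (cols : List (List Char)) (ch : List Char) :
    (pvDist cols ch).length = cols.length := by
  induction cols generalizing ch with
  | nil => cases ch <;> simp [pvDist]
  | cons col cols ih => cases ch <;> simp [pvDist, ih]

theorem pvDist_getElem (cols : List (List Char)) (ch : List Char) (c : Nat)
    (h : c < (pvDist cols ch).length) :
    (pvDist cols ch)[c] = cols[c]'(by rw [pvDist_length] at h; exact h) ++ (ch[c]?).toList := by
  induction cols generalizing ch c with
  | nil => simp [pvDist] at h
  | cons col cols ih =>
    cases ch with
    | nil => simp [pvDist]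
    | cons x ch =>
      cases c with
      | zero => simp [pvDist]
      | succ c =>
        simp only [pvDist] at h ⊢
        simp only [List.getElem_cons_succ, List.getElem?_cons_succ]
        exact ih ch c (by simpa [pvDist] using h)


theorem pvInner (ch : List Char) (cols : List (List Char)) (j : Nat) :
    ch.foldl (fun (p : List (List Char) × Nat) (letter : Char) =>
        (p.1.set p.2 (p.1.getD p.2 [] ++ [letter]), p.2 + 1)) (cols, j)
      = (cols.take j ++ pvDist (cols.drop j) ch, j + ch.length) := by
  induction ch generalizing cols j with
  | nil =>
    simp only [List.foldl_nil, List.length_nil, Nat.add_zero]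
    congr 1
    cases h : cols.drop j with
    | nil => simp [pvDist, List.take_of_length_le (by
        have := List.drop_eq_nil_iff.mp h; omega)]
    | cons col rest =>
      simp only [pvDist]
      rw [← h, List.take_append_drop]
  | cons x ch ih =>
    simp only [List.foldl_cons]
    rw [ih]
    cases h : cols.drop j with
    | nil =>
      have hj : cols.length ≤ j := by have := List.drop_eq_nil_iff.mp h; omega
      rw [List.set_eq_of_length_le hj]
      have h2 : cols.drop (j+1) = [] := List.drop_eq_nil_iff.mpr (by omega)
      rw [h2]
      simp [pvDist, Prod.ext_iff, List.take_of_length_le (by omega : cols.length ≤ j + 1),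
        List.take_of_length_le hj]
      omega
    | cons col rest =>
      have hj : j < cols.length := by
        by_contra hl
        rw [List.drop_eq_nil_iff.mpr (by omega)] at h; exact absurd h (by simp)
      have hq : cols[j]? = some col := by
        rw [List.getElem?_eq_getElem hj]
        have h0 : (cols.drop j)[0]? = some col := by rw [h]; rfl
        rw [List.getElem?_drop, Nat.add_zero] at h0
        rw [← List.getElem?_eq_getElem hj]; exact h0
      have hget : cols.getD j [] = col := by
        rw [List.getD_eq_getElem?_getD, hq]; rfl
      rw [hget]
      rw [List.set_eq_take_append_cons_drop, if_pos hj]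
      have hlen : (cols.take j).length = j := by simp [Nat.min_eq_left (le_of_lt hj)]
      have htake : (cols.take j ++ (col ++ [x]) :: cols.drop (j + 1)).take (j+1)
          = cols.take j ++ [col ++ [x]] := by
        rw [List.take_append, hlen]
        simp
      have hdrop : (cols.take j ++ (col ++ [x]) :: cols.drop (j + 1)).drop (j+1)
          = cols.drop (j+1) := by
        rw [List.drop_append, hlen]
        simp
      have hrest : cols.drop (j+1) = rest := by
        have h3 : (cols.drop j).tail = rest := by rw [h]; rfl
        rwa [List.tail_drop] at h3
      rw [htake, hdrop, hrest]
      simp [pvDist, Prod.ext_iff]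
      omega

theorem pvFoldA_length (f : Int → List Char) (rijs : List Int) (cols : List (List Char)) (om : Bool) :
    ((rijs.foldl (fun (st : List (List Char) × Bool) (rij : Int) =>
        (pvDist st.1 (if st.2 then (f rij).reverse else f rij), !st.2)) (cols, om)).1).length
      = cols.length := by
  induction rijs generalizing cols om with
  | nil => simp
  | cons r rijs ih => simp only [List.foldl_cons]; rw [ih, pvDist_length]

theorem pvFoldA_getElem (f : Int → List Char) (rijs : List Int) (om : Bool)
    (cols : List (List Char)) (c : Nat)
    (h : c < ((rijs.foldl (fun (st : List (List Char) × Bool) (rij : Int) =>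
        (pvDist st.1 (if st.2 then (f rij).reverse else f rij), !st.2)) (cols, om)).1).length) :
    ((rijs.foldl (fun (st : List (List Char) × Bool) (rij : Int) =>
        (pvDist st.1 (if st.2 then (f rij).reverse else f rij), !st.2)) (cols, om)).1)[c]
      = cols[c]'(by rw [pvFoldA_length] at h; exact h) ++ pvColF c om (rijs.map f) := by
  induction rijs generalizing cols om with
  | nil => simp [pvColF]
  | cons r rijs ih =>
    simp only [List.foldl_cons, List.map_cons]
    have h' : c < ((rijs.foldl (fun (st : List (List Char) × Bool) (rij : Int) =>
        (pvDist st.1 (if st.2 then (f rij).reverse else f rij), !st.2))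
        (pvDist cols (if om then (f r).reverse else f r), !om)).1).length := by
      simpa only [List.foldl_cons] using h
    rw [ih (!om) _ h']
    have hc : c < cols.length := by
      rw [pvFoldA_length, pvDist_length] at h'; exact h'
    have hc2 : c < (pvDist cols (if om then (f r).reverse else f r)).length := by
      rw [pvDist_length]; exact hc
    rw [pvDist_getElem _ _ _ hc2]
    rw [List.append_assoc]
    congr 1
    simp only [pvColF]
    congr 1
    set ch := f r with hch
    cases om with
    | false =>
      simp only [Bool.false_eq_true, ite_false]
      by_cases hlt : c < ch.length
      · rw [List.getElem?_eq_getElem hlt, if_pos hlt]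
        simp [List.getD_eq_getElem?_getD, List.getElem?_eq_getElem hlt]
      · rw [List.getElem?_eq_none (by omega), if_neg hlt]; rfl
    | true =>
      simp only [ite_true]
      by_cases hlt : c < ch.length
      · have hlt' : c < ch.reverse.length := by simpa using hlt
        rw [List.getElem?_reverse (by simpa using hlt), if_pos hlt]
        have hlt2 : ch.length - 1 - c < ch.length := by omega
        simp [List.getD_eq_getElem?_getD, List.getElem?_eq_getElem hlt2]
      · rw [List.getElem?_eq_none (by simp; omega), if_neg hlt]; rfl

theorem pvFoldB (c : Int) (hc : 0 ≤ c) (cs : List (List Char)) (s : Int) (hs : 0 ≤ s)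
    (acc : List Char) :
    (PySem.List.enumerate cs s).foldl
      (fun (tekens : List Char) (p : Int × List Char) =>
        let L : Int := p.2.length
        if c < L then
          tekens ++ [if p.1 % 2 == 0 then p.2.getD c.toNat ' ' else p.2.getD (L - 1 - c).toNat ' ']
        else tekens) acc
      = acc ++ pvColF c.toNat (s % 2 == 1) cs := by
  induction cs generalizing s acc with
  | nil => simp [PySem.List.enumerate, pvColF]
  | cons ch cs ih =>
    rw [PySem.List.enumerate_cons, List.foldl_cons]
    rw [ih (s+1) (by omega)]
    simp only [pvColF]
    have hpar : ((s + 1) % 2 == 1) = !(s % 2 == 1) := by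
      have h2 := Int.emod_emod_of_dvd s (by norm_num : (2:Int) ∣ 2)
      have hm : s % 2 = 0 ∨ s % 2 = 1 := by omega
      rcases hm with hm | hm <;> simp [hm] <;> omega
    rw [hpar]
    have hcond : (c < (ch.length : Int)) ↔ (c.toNat < ch.length) := by omega
    by_cases hlt : c.toNat < ch.length
    · rw [if_pos (by omega), if_pos hlt]
      have hmod : (s % 2 == 0) = !(s % 2 == 1) := by
        have hm : s % 2 = 0 ∨ s % 2 = 1 := by omega
        rcases hm with hm | hm <;> simp [hm]
      rw [hmod]
      have hidx : ((ch.length : Int) - 1 - c).toNat = ch.length - 1 - c.toNat := by omega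
      rw [hidx]
      cases hb : (s % 2 == 1) <;> simp [List.append_assoc]
    · rw [if_neg (by omega), if_neg hlt]
      simp

theorem pvRange_neg (n k : Int) (hk : k < 0) (hn : 0 ≤ n) :
    PySem.List.pyRange 0 n k = [] := by
  simp only [PySem.List.pyRange]
  split_ifs <;> simp_all <;> omega


theorem decodeer_spec : Claim_equal_decodeer := by
  intro bericht kolommen _ hpre
  unfold Spec_decodeer Pre_decodeer at *
  rcases lt_or_gt_of_ne hpre with hneg | hpos
  · -- kolommen < 0
    simp only [decodeer, decodeer_alt]
    rw [pvRange_neg _ _ hneg (by positivity), PySem.List.pyRange_one_eq_nil (by omega)]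
    simp [Int.toNat_of_nonpos (le_of_lt hneg)]
  · -- kolommen > 0
    simp only [decodeer, decodeer_alt, pvInner, List.take_zero, List.drop_zero,
      List.nil_append, Nat.zero_add]
    set f : Int → List Char := fun rij =>
      PySem.List.slice bericht.toList (some rij) (some (rij + kolommen)) with hf
    apply congrArg
    apply congrArg
    apply List.ext_getElem
    · rw [pvFoldA_length]
      simp [PySem.List.length_pyRange_one]
    · intro i h1 h2
      rw [pvFoldA_getElem]
      simp only [List.getElem_map, PySem.List.getElem_pyRange_one]
      rw [pvFoldB (0 + (i : Int)) (by omega) _ 0 (by omega)]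
      have h3 : i < kolommen.toNat := by
        rw [pvFoldA_length] at h1; simpa using h1
      simp only [List.getElem_replicate, List.nil_append]
      norm_num
      rw [hf]
      simp
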